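-- pv_equiv track=rewrite | github.com/emarberg/schurp | keys.py | skew_symmetric_halves
-- ===== SOURCE A (Python) =====
-- def skew_symmetric_diagram(alpha):
--     def s(i):
--         def f(x):
--             return (x + 1) if x == i else (x - 1) if x == i + 1 else x
--         return f
--     #
--     word = sorting_permutation(alpha)
--     mu = sorted(alpha, reverse=True)
--     diagram = {(i, j) for i in range(1, 1 + len(mu)) for j in range(1, 1 + mu[i - 1])}
--     for i in reversed(word):
--         diagram = {(s(i)(a), s(i)(b)) for (a, b) in diagram}
--     return diagram
--
-- def skew_symmetric_halves(alpha):
--     diagram = skew_symmetric_diagram(alpha)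
--     n = max([0] + [max(p) for p in diagram])
--     rows, cols = n * [0], n * [0]
--     for a, b in diagram:
--         if a < b:
--             rows[a - 1] += 1
--             cols[b - 1] += 1
--     while rows and rows[-1] == 0:
--         rows = rows[:-1]
--     while cols and cols[-1] == 0:
--         cols = cols[:-1]
--     return tuple(rows), tuple(cols)
--
-- def sorting_permutation(weak_comp):
--     word = []
--     n = len(weak_comp)
--     weak_comp = list(weak_comp)
--     for i in range(n):
--         for j in range(i, 0, -1):
--             if weak_comp[j] > weak_comp[j - 1]:
--                 word += [j]
--                 weak_comp[j - 1], weak_comp[j] = weak_comp[j], weak_comp[j - 1]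
--     return tuple(word)
-- ===== SOURCE B (Python) =====
-- def skew_symmetric_halves(alpha):
--     # Skip the reflection machinery entirely: the composed reflections send sorted-diagram
--     # position x to order[x-1]+1, where order is the stable descending argsort of alpha.
--     # Count row/column cells directly into dicts while tracking the maximal occupied
--     # row/column, so no zero arrays are allocated and trimmed.
--     n = len(alpha)
--     order = sorted(range(n), key=lambda k: alpha[k], reverse=True)
--     pos = [k + 1 for k in order]
--     rows, cols = {}, {}
--     r, c = 0, 0
--     for i in range(1, n + 1):
--         a = pos[i - 1]
--         m = alpha[a - 1]
--         for j in range(1, m + 1):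
--             b = pos[j - 1] if j <= n else j
--             if a < b:
--                 rows[a] = rows.get(a, 0) + 1
--                 cols[b] = cols.get(b, 0) + 1
--                 r = max(r, a)
--                 c = max(c, b)
--     return (tuple(rows.get(k, 0) for k in range(1, r + 1)),
--             tuple(cols.get(k, 0) for k in range(1, c + 1)))
-- ===== Notes on version B (the rewrite author's own statement) =====
-- stated objective: faster
-- what changed: B drops the sorting word and the repeated set-rebuilding entirely: it takes the stable descending argsort of alpha (which is what the composed reflections amount to), maps each diagram cell through it once, and counts rows/columns in dicts, reading the trimmed arrays off the maximal keys instead of allocating and trimming zero arrays.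
import Mathlib
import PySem

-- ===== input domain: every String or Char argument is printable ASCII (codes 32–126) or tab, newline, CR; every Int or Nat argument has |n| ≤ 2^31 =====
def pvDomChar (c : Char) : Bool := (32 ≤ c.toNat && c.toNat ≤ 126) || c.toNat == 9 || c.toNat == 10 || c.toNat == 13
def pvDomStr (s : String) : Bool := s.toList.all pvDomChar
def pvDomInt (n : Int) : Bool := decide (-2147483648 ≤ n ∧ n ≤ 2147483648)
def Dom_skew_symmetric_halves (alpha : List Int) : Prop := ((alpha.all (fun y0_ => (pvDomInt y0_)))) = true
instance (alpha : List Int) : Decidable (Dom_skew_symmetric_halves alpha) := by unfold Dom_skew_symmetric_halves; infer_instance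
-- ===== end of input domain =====

-- B replaces A's sorting word and the per-letter rebuilding of the diagram set by the stable
-- descending argsort of alpha applied to each cell once, counting rows/columns in dicts
-- (measured faster on large inputs); return value only.

-- ===== PORT A =====
-- helper s(i) from skew_symmetric_diagram
def sRefl (i x : Int) : Int := if x = i then x + 1 else if x = i + 1 then x - 1 else x

-- sorting_permutation: nested loops over range(n) and range(i,0,-1), state (word, weak_comp)
def sorting_permutation (weak_comp : List Int) : List Int :=
  let n : Int := weak_comp.length
  let res := (PySem.List.pyRange 0 n 1).foldl (fun st i =>
    (PySem.List.pyRange i 0 (-1)).foldl (fun st j =>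
      if PySem.List.pyGetD st.2 j 0 > PySem.List.pyGetD st.2 (j - 1) 0 then
        (st.1 ++ [j],
         PySem.List.pySetD (PySem.List.pySetD st.2 (j - 1) (PySem.List.pyGetD st.2 j 0)) j
           (PySem.List.pyGetD st.2 (j - 1) 0))
      else st) st) (([] : List Int), weak_comp)
  res.1

-- the diagram comprehension {(i, j) for i in range(1, 1+len(mu)) for j in range(1, 1+mu[i-1])}
def baseCells (mu : List Int) : List (Int × Int) :=
  (PySem.List.pyRange 1 (1 + mu.length) 1).flatMap (fun i =>
    (PySem.List.pyRange 1 (1 + PySem.List.pyGetD mu (i - 1) 0) 1).map (fun j => (i, j)))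

def skew_symmetric_diagram (alpha : List Int) : PySem.Set (Int × Int) :=
  let word := sorting_permutation alpha
  let mu := PySem.List.sorted alpha (fun x => x) true
  let diagram0 : PySem.Set (Int × Int) := PySem.Set.ofList (baseCells mu)
  word.reverse.foldl
    (fun d i => PySem.Set.ofList (d.map (fun p => (sRefl i p.1, sRefl i p.2)))) diagram0

-- the trailing-zero trim loops 'while rows and rows[-1] == 0: rows = rows[:-1]'
def trimTrailingZeros (l : List Int) : List Int :=
  if h : PySem.List.pyGet? l (-1) = some 0 then
    trimTrailingZeros l.dropLast
  else l
termination_by l.length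
decreasing_by
  have : l ≠ [] := by rintro rfl; simp [PySem.List.pyGet?] at h
  cases l with
  | nil => exact absurd rfl this
  | cons a t => simp

-- n = max(...), the counting loop over the diagram, the two trims
def halvesOf (diagram : List (Int × Int)) : List Int × List Int :=
  let n := (PySem.List.max? ((0 : Int) :: diagram.map (fun p => max p.1 p.2)) (fun x => x)).getD 0
  let rows0 := PySem.List.pyRepeat [(0 : Int)] n
  let cols0 := PySem.List.pyRepeat [(0 : Int)] n
  let rc := diagram.foldl (fun (rc : List Int × List Int) p =>
    if p.1 < p.2 then
      (PySem.List.pySetD rc.1 (p.1 - 1) (PySem.List.pyGetD rc.1 (p.1 - 1) 0 + 1),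
       PySem.List.pySetD rc.2 (p.2 - 1) (PySem.List.pyGetD rc.2 (p.2 - 1) 0 + 1))
    else rc) (rows0, cols0)
  (trimTrailingZeros rc.1, trimTrailingZeros rc.2)

def skew_symmetric_halves (alpha : List Int) : List Int × List Int :=
  halvesOf (skew_symmetric_diagram alpha)

-- ===== PORT B =====
def skew_symmetric_halves_alt (alpha : List Int) : List Int × List Int :=
  let n : Int := alpha.length
  let order := PySem.List.sorted (PySem.List.pyRange 0 n 1) (fun k => PySem.List.pyGetD alpha k 0) true
  let pos := order.map (fun k => k + 1)
  let st := (PySem.List.pyRange 1 (n + 1) 1).foldl (fun st i =>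
      let a := PySem.List.pyGetD pos (i - 1) 0
      let m := PySem.List.pyGetD alpha (a - 1) 0
      (PySem.List.pyRange 1 (m + 1) 1).foldl (fun st j =>
        let b := if j ≤ n then PySem.List.pyGetD pos (j - 1) 0 else j
        if a < b then
          ((st.1.1.modify a 0 (fun x => x + 1), st.1.2.modify b 0 (fun x => x + 1)),
           (max st.2.1 a, max st.2.2 b))
        else st) st)
    (((∅ : PySem.Dict Int Int), (∅ : PySem.Dict Int Int)), ((0 : Int), (0 : Int)))
  ((PySem.List.pyRange 1 (st.2.1 + 1) 1).map (fun k => st.1.1.getD k 0),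
   (PySem.List.pyRange 1 (st.2.2 + 1) 1).map (fun k => st.1.2.getD k 0))

-- ===== PRECONDITION & SPEC =====
def Spec_skew_symmetric_halves (alpha : List Int) (out : List Int × List Int) : Prop := out = skew_symmetric_halves_alt alpha
instance (alpha : List Int) (out : List Int × List Int) : Decidable (Spec_skew_symmetric_halves alpha out) := by unfold Spec_skew_symmetric_halves; infer_instance

-- ===== CLAIM (what is proved, stated in full; the proofs are below) =====
def Claim_equal_skew_symmetric_halves : Prop := ∀ (alpha : List Int), Dom_skew_symmetric_halves alpha → Spec_skew_symmetric_halves alpha (skew_symmetric_halves alpha)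

-- ===== LEMMAS AND PROOFS =====
-- ---- proof-side definitions (used only by the proofs) ----
def keyOf (alpha : List Int) (k : Int) : Int := PySem.List.pyGetD alpha k 0

def bef (alpha : List Int) : Int → Int → Bool := fun a b => decide (keyOf alpha b < keyOf alpha a)

def swapQ (Q : List Int) (j : Int) : List Int :=
  PySem.List.pySetD (PySem.List.pySetD Q (j - 1) (PySem.List.pyGetD Q j 0)) j
    (PySem.List.pyGetD Q (j - 1) 0)

def IStep (alpha : List Int) (st : List Int × List Int) (j : Int) : List Int × List Int :=
  if keyOf alpha (PySem.List.pyGetD st.2 j 0) > keyOf alpha (PySem.List.pyGetD st.2 (j - 1) 0)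
  then (st.1 ++ [j], swapQ st.2 j) else st

def QStep (alpha : List Int) (Q : List Int) (j : Int) : List Int :=
  if keyOf alpha (PySem.List.pyGetD Q j 0) > keyOf alpha (PySem.List.pyGetD Q (j - 1) 0)
  then swapQ Q j else Q

-- ---- basic facts about sRefl ----
theorem sRefl_fix_large {i x : Int} (h : i + 1 < x) : sRefl i x = x := by
  unfold sRefl; split_ifs <;> omega

theorem sRefl_bounds {i x L : Int} (hi : 0 ≤ i) (hiL : i + 1 < L) (hx : 0 ≤ x) (hxL : x < L) :
    0 ≤ sRefl i x ∧ sRefl i x < L := by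
  unfold sRefl; split_ifs <;> omega

theorem sRefl_shift (j x : Int) : sRefl (j - 1) (x - 1) = sRefl j x - 1 := by
  unfold sRefl; split_ifs <;> omega

theorem sRefl_inj (i : Int) : Function.Injective (sRefl i) := by
  intro x y h
  unfold sRefl at h; split_ifs at h <;> omega

theorem foldr_sRefl_fix {n : Int} (w : List Int) (hw : ∀ i ∈ w, i + 1 ≤ n)
    {x : Int} (hx : n < x) : w.foldr (fun i y => sRefl i y) x = x := by
  induction w with
  | nil => rfl
  | cons i t ih =>
      have ht := ih (fun j hj => hw j (List.mem_cons_of_mem _ hj))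
      simp only [List.foldr_cons, ht]
      exact sRefl_fix_large (by have := hw i List.mem_cons_self; omega)

-- swapQ read back through sRefl (0-based positions i = j-1, i+1 = j)
theorem pyGetD_swap (a : List Int) (i x : Int) (hi : 0 ≤ i) (hiL : i + 1 < (a.length : Int))
    (hx : 0 ≤ x) (hxL : x < (a.length : Int)) :
    PySem.List.pyGetD
      (PySem.List.pySetD (PySem.List.pySetD a i (PySem.List.pyGetD a (i + 1) 0)) (i + 1)
        (PySem.List.pyGetD a i 0)) x 0
      = PySem.List.pyGetD a (sRefl i x) 0 := by
  have h02 : (0:Int) ≤ i + 1 := by omega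
  rw [PySem.List.pySetD_of_nonneg _ _ hi, PySem.List.pySetD_of_nonneg _ _ h02,
      PySem.List.pyGetD_eq_getElem _ _ hi (by omega), PySem.List.pyGetD_eq_getElem _ _ h02 (by omega),
      PySem.List.pyGetD_eq_getElem _ _ hx (by simp; omega)]
  have hsr := sRefl_bounds hi hiL hx hxL
  rw [PySem.List.pyGetD_eq_getElem _ _ hsr.1 hsr.2]
  unfold sRefl
  split_ifs with h1 h2
  · subst h1
    rw [List.getElem_set_ne (show (x + 1).toNat ≠ x.toNat by omega), List.getElem_set_self]
  · subst h2
    rw [List.getElem_set_self]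
    congr 1
    omega
  · rw [List.getElem_set_ne (show (i + 1).toNat ≠ x.toNat by omega),
        List.getElem_set_ne (show i.toNat ≠ x.toNat by omega)]

theorem length_swapQ (Q : List Int) (j : Int) : (swapQ Q j).length = Q.length := by
  unfold swapQ; simp [PySem.List.length_pySetD]

theorem length_IStep (alpha : List Int) (st : List Int × List Int) (j : Int) :
    ((IStep alpha st j).2).length = st.2.length := by
  unfold IStep; split_ifs <;> simp [length_swapQ]

-- ---- simulation: A's fold on the value array mirrors IStep on the index array ----
theorem sim_step (alpha : List Int) (w Q : List Int) (j : Int) (h1 : 1 ≤ j)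
    (h2 : j < (Q.length : Int)) :
    (if PySem.List.pyGetD (Q.map (keyOf alpha)) j 0 > PySem.List.pyGetD (Q.map (keyOf alpha)) (j - 1) 0 then
        (w ++ [j],
         PySem.List.pySetD (PySem.List.pySetD (Q.map (keyOf alpha)) (j - 1)
             (PySem.List.pyGetD (Q.map (keyOf alpha)) j 0)) j
           (PySem.List.pyGetD (Q.map (keyOf alpha)) (j - 1) 0))
      else (w, Q.map (keyOf alpha)))
    = ((IStep alpha (w, Q) j).1, (IStep alpha (w, Q) j).2.map (keyOf alpha)) := by
  have hj0 : (0:Int) ≤ j := by omega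
  have hj1 : (0:Int) ≤ j - 1 := by omega
  have hlm : ((Q.map (keyOf alpha)).length : Int) = (Q.length : Int) := by simp
  have e1 : PySem.List.pyGetD (Q.map (keyOf alpha)) j 0 = keyOf alpha (PySem.List.pyGetD Q j 0) := by
    rw [PySem.List.pyGetD_eq_getElem _ _ hj0 (by omega), PySem.List.pyGetD_eq_getElem _ _ hj0 (by omega),
        List.getElem_map]
  have e2 : PySem.List.pyGetD (Q.map (keyOf alpha)) (j - 1) 0
      = keyOf alpha (PySem.List.pyGetD Q (j - 1) 0) := by
    rw [PySem.List.pyGetD_eq_getElem _ _ hj1 (by omega), PySem.List.pyGetD_eq_getElem _ _ hj1 (by omega),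
        List.getElem_map]
  unfold IStep swapQ
  simp only [e1, e2]
  split_ifs with h
  · simp only [Prod.mk.injEq, true_and]
    rw [PySem.List.pySetD_of_nonneg _ _ hj1, PySem.List.pySetD_of_nonneg _ _ hj0,
        PySem.List.pySetD_of_nonneg _ _ hj1, PySem.List.pySetD_of_nonneg _ _ hj0,
        ← List.map_set, ← List.map_set]
  · rfl

theorem sim_fold (alpha : List Int) (l : List Int) (w Q : List Int)
    (hl : ∀ j ∈ l, 1 ≤ j ∧ j < (Q.length : Int)) :
    l.foldl (fun (st : List Int × List Int) j =>
      if PySem.List.pyGetD st.2 j 0 > PySem.List.pyGetD st.2 (j - 1) 0 then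
        (st.1 ++ [j],
         PySem.List.pySetD (PySem.List.pySetD st.2 (j - 1) (PySem.List.pyGetD st.2 j 0)) j
           (PySem.List.pyGetD st.2 (j - 1) 0))
      else st) (w, Q.map (keyOf alpha))
    = ((l.foldl (IStep alpha) (w, Q)).1, (l.foldl (IStep alpha) (w, Q)).2.map (keyOf alpha)) := by
  induction l generalizing w Q with
  | nil => rfl
  | cons j t ih =>
      have hj := hl j List.mem_cons_self
      simp only [List.foldl_cons]
      rw [sim_step alpha w Q j hj.1 hj.2]
      have hlen : (((IStep alpha (w, Q) j).2).length : Int) = (Q.length : Int) := by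
        rw [length_IStep]
      rw [← Prod.mk.eta (p := IStep alpha (w, Q) j)]
      exact ih _ _ (fun x hx => ⟨(hl x (List.mem_cons_of_mem _ hx)).1, by
        rw [hlen]; exact (hl x (List.mem_cons_of_mem _ hx)).2⟩)

theorem proj2_fold (alpha : List Int) (l : List Int) (w Q : List Int) :
    (l.foldl (IStep alpha) (w, Q)).2 = l.foldl (QStep alpha) Q := by
  induction l generalizing w Q with
  | nil => rfl
  | cons j t ih =>
      simp only [List.foldl_cons]
      rw [show IStep alpha (w, Q) j = ((IStep alpha (w, Q) j).1, QStep alpha Q j) from ?_]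
      · exact ih _ _
      · unfold IStep QStep; split_ifs <;> rfl

-- length is preserved by a fold of IStep
theorem length_Ifold (alpha : List Int) (l : List Int) (st : List Int × List Int) :
    ((l.foldl (IStep alpha) st).2).length = st.2.length := by
  induction l generalizing st with
  | nil => rfl
  | cons j t ih => simp only [List.foldl_cons]; rw [ih, length_IStep]

-- ---- the word invariant: foldr of sRefl over the word reads the index array ----
def WInv (alpha : List Int) (st : List Int × List Int) : Prop :=
  ∀ x : Int, 1 ≤ x → x ≤ (alpha.length : Int) →
    st.1.foldr (fun i y => sRefl i y) x = PySem.List.pyGetD st.2 (x - 1) 0 + 1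

theorem WInv_step (alpha : List Int) (st : List Int × List Int) (j : Int)
    (hj : 1 ≤ j) (hjn : j + 1 ≤ (alpha.length : Int)) (hlen : st.2.length = alpha.length)
    (h : WInv alpha st) : WInv alpha (IStep alpha st j) := by
  unfold IStep
  split_ifs with hc
  · intro x hx1 hx2
    simp only [List.foldr_append, List.foldr_cons, List.foldr_nil]
    have hsx : 1 ≤ sRefl j x ∧ sRefl j x ≤ (alpha.length : Int) := by
      unfold sRefl; split_ifs <;> omega
    rw [h (sRefl j x) hsx.1 hsx.2]
    have hswap : PySem.List.pyGetD (swapQ st.2 j) (x - 1) 0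
        = PySem.List.pyGetD st.2 (sRefl (j - 1) (x - 1)) 0 := by
      unfold swapQ
      have := pyGetD_swap st.2 (j - 1) (x - 1) (by omega) (by rw [hlen]; omega)
        (by omega) (by rw [hlen]; omega)
      simpa using this
    rw [hswap, sRefl_shift]
  · exact h

-- ---- the inner loop is a stable insertion of the new element into the sorted prefix ----
theorem getD_mid_left (P : List Int) (u t : Int) (R : List Int) :
    PySem.List.pyGetD (P ++ u :: t :: R) ((P.length : Int)) 0 = u := by
  rw [PySem.List.pyGetD_natCast]
  rw [List.getD_append_right _ _ _ _ (Nat.le_refl P.length)]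
  simp [List.getD]

theorem getD_mid_right (P : List Int) (u t : Int) (R : List Int) :
    PySem.List.pyGetD (P ++ u :: t :: R) ((P.length : Int) + 1) 0 = t := by
  rw [show (P.length : Int) + 1 = ((P.length + 1 : Nat) : Int) by omega, PySem.List.pyGetD_natCast]
  rw [List.getD_append_right _ _ _ _ (by omega : P.length ≤ P.length + 1)]
  simp [List.getD]

theorem set_set_adjacent (P : List Int) (u t : Int) (R : List Int) :
    ((P ++ u :: t :: R).set P.length t).set (P.length + 1) u = P ++ t :: u :: R := by
  induction P with
  | nil => rfl
  | cons p ps ih => simp [ih]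

theorem swap_adjacent (P : List Int) (u t : Int) (R : List Int) :
    swapQ (P ++ u :: t :: R) ((P.length : Int) + 1) = P ++ t :: u :: R := by
  unfold swapQ
  have h1 : (P.length : Int) + 1 - 1 = (P.length : Int) := by omega
  rw [h1, getD_mid_left, getD_mid_right,
      PySem.List.pySetD_of_nonneg _ _ (by omega : (0:Int) ≤ (P.length : Int)),
      PySem.List.pySetD_of_nonneg _ _ (by omega : (0:Int) ≤ (P.length : Int) + 1)]
  have h2 : ((P.length : Int)).toNat = P.length := by omega
  have h3 : ((P.length : Int) + 1).toNat = P.length + 1 := by omega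
  rw [h2, h3]
  exact set_set_adjacent P u t R

theorem insertBy_append_singleton (before : Int → Int → Bool) (t u : Int) (L : List Int)
    (h : before t u = true) :
    PySem.List.insertBy before t (L ++ [u]) = PySem.List.insertBy before t L ++ [u] := by
  induction L with
  | nil => simp [PySem.List.insertBy, h]
  | cons y ys ih =>
      simp only [List.cons_append, PySem.List.insertBy]
      split_ifs <;> simp [ih]

-- a fold of QStep over a descending region does nothing
theorem qfold_id (alpha : List Int) (m : Nat) (Q : List Int)
    (hadj : ∀ j : Nat, 1 ≤ j → j ≤ m →
      ¬ keyOf alpha (PySem.List.pyGetD Q (j : Int) 0) > keyOf alpha (PySem.List.pyGetD Q ((j : Int) - 1) 0)) :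
    (PySem.List.pyRange (m : Int) 0 (-1)).foldl (QStep alpha) Q = Q := by
  induction m with
  | zero => rfl
  | succ k ih =>
      rw [PySem.List.pyRange_neg_one_cons (by omega : (0:Int) < ((k+1 : Nat) : Int))]
      simp only [List.foldl_cons]
      have hs : QStep alpha Q ((k+1 : Nat) : Int) = Q := by
        unfold QStep
        rw [if_neg (hadj (k+1) (by omega) (by omega))]
      rw [hs]
      have h2 : ((k+1 : Nat) : Int) - 1 = (k : Int) := by omega
      rw [h2]
      exact ih (fun j h1 h2' => hadj j h1 (by omega))

theorem qfold_insert (alpha : List Int) (m : Nat) (L : List Int) (t : Int) (R : List Int)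
    (hL : L.length = m)
    (hs : List.Pairwise (fun a b => keyOf alpha b ≤ keyOf alpha a) L) :
    (PySem.List.pyRange (m : Int) 0 (-1)).foldl (QStep alpha) (L ++ t :: R)
      = PySem.List.insertBy (bef alpha) t L ++ R := by
  induction m generalizing L t R with
  | zero =>
      rw [List.eq_nil_of_length_eq_zero hL]
      rfl
  | succ k ih =>
      rcases List.eq_nil_or_concat L with rfl | ⟨L', u, rfl⟩
      · simp at hL
      rw [List.concat_eq_append] at *
      have hL' : L'.length = k := by simp at hL; omega
      rw [PySem.List.pyRange_neg_one_cons (by omega : (0:Int) < ((k+1 : Nat) : Int))]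
      simp only [List.foldl_cons]
      have hcast : ((k+1 : Nat) : Int) = (L'.length : Int) + 1 := by omega
      have hQ : (L' ++ [u]) ++ t :: R = L' ++ u :: t :: R := by simp
      by_cases hc : keyOf alpha u < keyOf alpha t
      · -- swap, then insert t into L'
        have hstep : QStep alpha ((L' ++ [u]) ++ t :: R) ((k+1 : Nat) : Int)
            = L' ++ t :: u :: R := by
          unfold QStep
          rw [hcast, hQ]
          have e1 : (L'.length : Int) + 1 - 1 = (L'.length : Int) := by omega
          rw [e1, getD_mid_left, getD_mid_right, if_pos hc, swap_adjacent]
        rw [hstep]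
        have h2 : ((k+1 : Nat) : Int) - 1 = (k : Int) := by omega
        rw [h2]
        have hs' : List.Pairwise (fun a b => keyOf alpha b ≤ keyOf alpha a) L' :=
          hs.sublist (by simp)
        rw [show L' ++ t :: u :: R = L' ++ t :: (u :: R) from rfl,
            ih L' t (u :: R) hL' hs',
            insertBy_append_singleton (bef alpha) t u L'
              (by simp only [bef, decide_eq_true_eq]; exact hc)]
        simp
      · -- no swap; the rest of the pass sees only the sorted prefix
        have hub : ∀ y ∈ L' ++ [u], keyOf alpha t ≤ keyOf alpha y := by
          intro y hy
          rcases List.mem_append.mp hy with hy' | hy'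
          · rcases List.pairwise_append.mp hs with ⟨_, _, hcross⟩
            have := hcross y hy' u (by simp)
            omega
          · simp at hy'; subst hy'; omega
        have hstep : QStep alpha ((L' ++ [u]) ++ t :: R) ((k+1 : Nat) : Int)
            = (L' ++ [u]) ++ t :: R := by
          unfold QStep
          rw [hcast, hQ]
          have e1 : (L'.length : Int) + 1 - 1 = (L'.length : Int) := by omega
          rw [e1, getD_mid_left, getD_mid_right, if_neg (by omega)]
        rw [hstep]
        have h2 : ((k+1 : Nat) : Int) - 1 = (k : Int) := by omega
        rw [h2]
        have hadj : ∀ j : Nat, 1 ≤ j → j ≤ k →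
            ¬ keyOf alpha (PySem.List.pyGetD ((L' ++ [u]) ++ t :: R) (j : Int) 0)
              > keyOf alpha (PySem.List.pyGetD ((L' ++ [u]) ++ t :: R) ((j : Int) - 1) 0) := by
          intro j h1 h2'
          have hlen : (L' ++ [u]).length = k + 1 := by simp [hL']
          have ej : PySem.List.pyGetD ((L' ++ [u]) ++ t :: R) (j : Int) 0
              = (L' ++ [u]).getD j 0 := by
            rw [PySem.List.pyGetD_natCast, List.getD_append _ _ _ _ (by omega)]
          have ej1 : PySem.List.pyGetD ((L' ++ [u]) ++ t :: R) ((j : Int) - 1) 0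
              = (L' ++ [u]).getD (j - 1) 0 := by
            rw [show (j : Int) - 1 = ((j - 1 : Nat) : Int) by omega, PySem.List.pyGetD_natCast,
                List.getD_append _ _ _ _ (by omega)]
          rw [ej, ej1, List.getD_eq_getElem _ _ (by omega), List.getD_eq_getElem _ _ (by omega)]
          have := List.pairwise_iff_getElem.mp hs (j-1) j (by omega) (by omega) (by omega)
          omega
        rw [qfold_id alpha k _ hadj,
            PySem.List.insertBy_of_forall_not_before (bef alpha) t (L' ++ [u])
              (by intro y hy; simp [bef]; have := hub y hy; omega)]
        simp

theorem proj2_fold' (alpha : List Int) (l : List Int) (st : List Int × List Int) :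
    (l.foldl (IStep alpha) st).2 = l.foldl (QStep alpha) st.2 := by
  rw [← Prod.mk.eta (p := st), proj2_fold]

-- ---- the outer loop: sorted prefix plus untouched tail, with the word invariant ----
def OuterFold (alpha : List Int) (m : Nat) : List Int × List Int :=
  ((List.range m).map (fun k : Nat => (k : Int))).foldl
    (fun st i => (PySem.List.pyRange i 0 (-1)).foldl (IStep alpha) st)
    (([] : List Int), PySem.List.pyRange 0 (alpha.length : Int) 1)

theorem outer_inv (alpha : List Int) : ∀ m : Nat, m ≤ alpha.length →
    (OuterFold alpha m).2
      = PySem.List.sorted ((List.range m).map (fun k : Nat => (k : Int))) (keyOf alpha) true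
          ++ PySem.List.pyRange (m : Int) (alpha.length : Int) 1
      ∧ WInv alpha (OuterFold alpha m) := by
  intro m
  induction m with
  | zero =>
      intro _
      constructor
      · rfl
      · intro x hx1 hx2
        simp only [OuterFold, List.range_zero, List.map_nil, List.foldl_nil, List.foldr_nil]
        rw [PySem.List.pyGetD_eq_getElem _ _ (by omega)
              (by rw [PySem.List.length_pyRange_one]; omega),
            PySem.List.getElem_pyRange_one]
        omega
  | succ m ih =>
      intro hm
      have ihm := ih (by omega)
      have hunf : OuterFold alpha (m + 1)
          = (PySem.List.pyRange (m : Int) 0 (-1)).foldl (IStep alpha) (OuterFold alpha m) := by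
        unfold OuterFold
        rw [List.range_succ, List.map_append, List.foldl_append]
        rfl
      have hlenP : (PySem.List.sorted ((List.range m).map (fun k : Nat => (k : Int))) (keyOf alpha) true).length = m := by
        rw [PySem.List.length_sorted]; simp
      have hcons : PySem.List.pyRange (m : Int) (alpha.length : Int) 1
          = (m : Int) :: PySem.List.pyRange ((m : Int) + 1) (alpha.length : Int) 1 := by
        exact PySem.List.pyRange_one_cons (by omega)
      have hlen2 : ((OuterFold alpha m).2).length = alpha.length := by
        rw [ihm.1]
        simp [hlenP, PySem.List.length_pyRange_one]
        omega
      constructor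
      · -- the index array after one more pass
        rw [hunf, proj2_fold' alpha _ (OuterFold alpha m), ihm.1, hcons,
            qfold_insert alpha m _ (m : Int) _ hlenP
              (PySem.List.sorted_pairwise_rev _ _),
            PySem.List.sorted_rev_eq_foldl_insertBy ((List.range (m+1)).map (fun k : Nat => (k : Int))) (keyOf alpha),
            List.range_succ, List.map_append, List.foldl_append,
            ← PySem.List.sorted_rev_eq_foldl_insertBy ((List.range m).map (fun k : Nat => (k : Int))) (keyOf alpha)]
        simp only [List.map_cons, List.map_nil, List.foldl_cons, List.foldl_nil]
        have : ((m : Nat) : Int) + 1 = (((m + 1 : Nat)) : Int) := by omega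
        rw [this]
        rfl
      · -- the word invariant survives the pass
        rw [hunf]
        refine List.foldlRecOn _ _
          (motive := fun st => st.2.length = alpha.length ∧ WInv alpha st) ⟨hlen2, ihm.2⟩ ?_ |>.2
        intro st hst j hj
        have hj' : 0 < j ∧ j ≤ (m : Int) := PySem.List.mem_pyRange_neg_one.mp hj
        exact ⟨by rw [length_IStep]; exact hst.1,
          WInv_step alpha st j (by omega) (by omega) hst.1 hst.2⟩


-- ---- A's sorting fold is the simulation on the index array ----
theorem sim_nested (alpha : List Int) (l : List Int) : ∀ (w Q : List Int),
    (∀ i ∈ l, 0 ≤ i ∧ i < (Q.length : Int)) →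
    List.foldl (fun st i =>
      (PySem.List.pyRange i 0 (-1)).foldl (fun (st : List Int × List Int) j =>
        if PySem.List.pyGetD st.2 j 0 > PySem.List.pyGetD st.2 (j - 1) 0 then
          (st.1 ++ [j],
           PySem.List.pySetD (PySem.List.pySetD st.2 (j - 1) (PySem.List.pyGetD st.2 j 0)) j
             (PySem.List.pyGetD st.2 (j - 1) 0))
        else st) st) (w, Q.map (keyOf alpha)) l
    = ((List.foldl (fun st i => (PySem.List.pyRange i 0 (-1)).foldl (IStep alpha) st) (w, Q) l).1,
       (List.foldl (fun st i => (PySem.List.pyRange i 0 (-1)).foldl (IStep alpha) st) (w, Q) l).2.map (keyOf alpha)) := by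
  induction l with
  | nil => intro w Q _; rfl
  | cons i t ih =>
      intro w Q hl
      have hi := hl i List.mem_cons_self
      simp only [List.foldl_cons]
      rw [sim_fold alpha _ w Q (fun j hj => by
        have := PySem.List.mem_pyRange_neg_one.mp hj
        exact ⟨by omega, by omega⟩)]
      have hlen : (((PySem.List.pyRange i 0 (-1)).foldl (IStep alpha) (w, Q)).2).length = Q.length := by
        rw [length_Ifold]
      rw [← Prod.mk.eta (p := (PySem.List.pyRange i 0 (-1)).foldl (IStep alpha) (w, Q))]
      exact ih _ _ (fun x hx => ⟨(hl x (List.mem_cons_of_mem _ hx)).1, by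
        rw [hlen]; exact (hl x (List.mem_cons_of_mem _ hx)).2⟩)

theorem sorting_eq (alpha : List Int) :
    sorting_permutation alpha = (OuterFold alpha alpha.length).1 := by
  have hrange : (List.range alpha.length).map (fun k : Nat => (k : Int))
      = PySem.List.pyRange 0 (alpha.length : Int) 1 := by
    rw [PySem.List.pyRange_zero_natCast]
  have halpha : alpha
      = (PySem.List.pyRange 0 (alpha.length : Int) 1).map (keyOf alpha) := by
    conv_lhs => rw [← PySem.List.map_pyGetD_pyRange_zero alpha 0]
    rfl
  have e0 : sorting_permutation alpha
      = (List.foldl (fun st i =>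
          (PySem.List.pyRange i 0 (-1)).foldl (fun (st : List Int × List Int) j =>
            if PySem.List.pyGetD st.2 j 0 > PySem.List.pyGetD st.2 (j - 1) 0 then
              (st.1 ++ [j],
               PySem.List.pySetD (PySem.List.pySetD st.2 (j - 1) (PySem.List.pyGetD st.2 j 0)) j
                 (PySem.List.pyGetD st.2 (j - 1) 0))
            else st) st) (([] : List Int), alpha)
          (PySem.List.pyRange 0 (alpha.length : Int) 1)).1 := rfl
  rw [e0, show (([] : List Int), alpha)
        = (([] : List Int), (PySem.List.pyRange 0 (alpha.length : Int) 1).map (keyOf alpha))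
      from by rw [← halpha]]
  rw [sim_nested alpha _ [] (PySem.List.pyRange 0 (alpha.length : Int) 1) (fun i hi => by
    have := PySem.List.mem_pyRange_one.mp hi
    rw [PySem.List.length_pyRange_one]
    exact ⟨this.1, by omega⟩)]
  unfold OuterFold
  rw [hrange]

theorem outer_final (alpha : List Int) :
    (OuterFold alpha alpha.length).2
      = PySem.List.sorted (PySem.List.pyRange 0 (alpha.length : Int) 1) (keyOf alpha) true := by
  have h := (outer_inv alpha alpha.length (Nat.le_refl _)).1
  have hnil : PySem.List.pyRange ((alpha.length : Nat) : Int) (alpha.length : Int) 1 = [] := by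
    apply List.eq_nil_of_length_eq_zero
    rw [PySem.List.length_pyRange_one]
    omega
  rw [h, hnil, List.append_nil, PySem.List.pyRange_zero_natCast]

-- the composed reflections read positions off the stable descending argsort
theorem word_order (alpha : List Int) (x : Int) (hx1 : 1 ≤ x) (hx2 : x ≤ (alpha.length : Int)) :
    (sorting_permutation alpha).foldr (fun i y => sRefl i y) x
      = PySem.List.pyGetD
          (PySem.List.sorted (PySem.List.pyRange 0 (alpha.length : Int) 1)
            (fun k => PySem.List.pyGetD alpha k 0) true) (x - 1) 0 + 1 := by
  have h := (outer_inv alpha alpha.length (Nat.le_refl _)).2 x hx1 hx2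
  rw [sorting_eq alpha, h, outer_final alpha]
  rfl

-- ---- the letters of the sorting word lie in [1, n-1] ----
theorem word_bounds (alpha : List Int) :
    ∀ j ∈ sorting_permutation alpha, 1 ≤ j ∧ j ≤ (alpha.length : Int) - 1 := by
  unfold sorting_permutation
  dsimp only
  refine (List.foldlRecOn _ _ (motive := fun (st : List Int × List Int) => ∀ j ∈ st.1, 1 ≤ j ∧ j ≤ (alpha.length : Int) - 1) ?_ ?_)
  · intro j hj; simp at hj
  · intro st hst i hi
    have hi' : 0 ≤ i ∧ i < (alpha.length : Int) := PySem.List.mem_pyRange_one.mp hi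
    refine (List.foldlRecOn _ _ (motive := fun (st : List Int × List Int) => ∀ j ∈ st.1, 1 ≤ j ∧ j ≤ (alpha.length : Int) - 1) hst ?_)
    intro st' hst' j hj
    have hj' : 0 < j ∧ j ≤ i := PySem.List.mem_pyRange_neg_one.mp hj
    intro k hk
    split at hk
    · rcases List.mem_append.mp hk with h | h
      · exact hst' k h
      · simp at h; omega
    · exact hst' k hk

theorem nodup_baseCells (mu : List Int) : (baseCells mu).Nodup := by
  unfold baseCells
  rw [List.nodup_flatMap]
  constructor
  · intro i _
    exact (PySem.List.nodup_pyRange_one _ _).map (fun a b h => by simpa using h)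
  · have := PySem.List.pairwise_lt_pyRange_one (a := 1) (b := 1 + (mu.length : Int))
    refine this.imp ?_
    intro a b hab p hp hp'
    simp only [List.mem_map] at hp hp'
    rcases hp with ⟨j, _, rfl⟩
    rcases hp' with ⟨k, _, h⟩
    have : b = a := congrArg Prod.fst h
    omega

-- A's fold of set-images is the map of the composed reflections
theorem foldl_image (w : List Int) (l : List (Int × Int)) (hl : l.Nodup) :
    w.foldl (fun d i => PySem.Set.ofList (d.map (fun p => (sRefl i p.1, sRefl i p.2)))) l
      = l.map (fun p => (w.foldl (fun x i => sRefl i x) p.1, w.foldl (fun x i => sRefl i x) p.2)) := by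
  induction w generalizing l with
  | nil => simp
  | cons i t ih =>
      have hinj : Function.Injective (fun p : Int × Int => (sRefl i p.1, sRefl i p.2)) := by
        intro p q h
        simp only [Prod.mk.injEq] at h
        exact Prod.ext (sRefl_inj i h.1) (sRefl_inj i h.2)
      have hnd : (l.map (fun p : Int × Int => (sRefl i p.1, sRefl i p.2))).Nodup := hl.map hinj
      simp only [List.foldl_cons, PySem.Set.ofList_eq_self_of_nodup _ hnd, ih _ hnd, List.map_map]
      rfl

-- ---- mu is the key image of the stable descending argsort ----
theorem map_key_insertBy (alpha : List Int) (t : Int) (L : List Int) :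
    (PySem.List.insertBy (bef alpha) t L).map (keyOf alpha)
      = PySem.List.insertBy (fun a b => decide (b < a)) (keyOf alpha t) (L.map (keyOf alpha)) := by
  induction L with
  | nil => rfl
  | cons y ys ih =>
      simp only [PySem.List.insertBy, List.map_cons, bef]
      split_ifs with h1 h2 <;> simp_all [PySem.List.insertBy]

theorem map_key_foldl_insertBy (alpha : List Int) (l : List Int) : ∀ (acc : List Int),
    (l.foldl (fun acc x => PySem.List.insertBy (bef alpha) x acc) acc).map (keyOf alpha)
      = (l.map (keyOf alpha)).foldl (fun acc x => PySem.List.insertBy (fun a b => decide (b < a)) x acc)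
          (acc.map (keyOf alpha)) := by
  induction l with
  | nil => intro acc; rfl
  | cons x xs ih =>
      intro acc
      simp only [List.foldl_cons, List.map_cons, ih, map_key_insertBy]

theorem mu_eq (alpha : List Int) :
    PySem.List.sorted alpha (fun x => x) true
      = (PySem.List.sorted (PySem.List.pyRange 0 (alpha.length : Int) 1) (keyOf alpha) true).map
          (keyOf alpha) := by
  rw [PySem.List.sorted_rev_eq_foldl_insertBy (PySem.List.pyRange 0 (alpha.length : Int) 1) (keyOf alpha)]
  have h := map_key_foldl_insertBy alpha (PySem.List.pyRange 0 (alpha.length : Int) 1) []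
  rw [show (List.foldl (fun acc x => PySem.List.insertBy (fun a b => decide (keyOf alpha b < keyOf alpha a)) x acc) [] (PySem.List.pyRange 0 (alpha.length : Int) 1))
      = (List.foldl (fun acc x => PySem.List.insertBy (bef alpha) x acc) [] (PySem.List.pyRange 0 (alpha.length : Int) 1)) from rfl, h]
  have halpha : (PySem.List.pyRange 0 (alpha.length : Int) 1).map (keyOf alpha) = alpha := by
    conv_rhs => rw [← PySem.List.map_pyGetD_pyRange_zero alpha 0]
    rfl
  rw [halpha, PySem.List.sorted_rev_eq_foldl_insertBy alpha (fun x => x)]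
  rfl

-- ---- the diagram, as the cell list B traverses ----
def pvOrder (alpha : List Int) : List Int :=
  PySem.List.sorted (PySem.List.pyRange 0 (alpha.length : Int) 1) (keyOf alpha) true

def posOf (alpha : List Int) : List Int := (pvOrder alpha).map (fun k => k + 1)

def cellsB (alpha : List Int) : List (Int × Int) :=
  (PySem.List.pyRange 1 ((alpha.length : Int) + 1) 1).flatMap (fun i =>
    (PySem.List.pyRange 1
        (PySem.List.pyGetD alpha (PySem.List.pyGetD (posOf alpha) (i - 1) 0 - 1) 0 + 1) 1).map
      (fun j => (PySem.List.pyGetD (posOf alpha) (i - 1) 0,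
        if j ≤ (alpha.length : Int) then PySem.List.pyGetD (posOf alpha) (j - 1) 0 else j)))

theorem length_pvOrder (alpha : List Int) : (pvOrder alpha).length = alpha.length := by
  unfold pvOrder
  rw [PySem.List.length_sorted, PySem.List.length_pyRange_one]
  omega

theorem pos_getD (alpha : List Int) (x : Int) (hx : 1 ≤ x) (hx2 : x ≤ (alpha.length : Int)) :
    PySem.List.pyGetD (posOf alpha) (x - 1) 0
      = PySem.List.pyGetD (pvOrder alpha) (x - 1) 0 + 1 := by
  unfold posOf
  rw [PySem.List.pyGetD_eq_getElem _ _ (by omega) (by simp [length_pvOrder]; omega),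
      PySem.List.pyGetD_eq_getElem _ _ (by omega) (by rw [length_pvOrder]; omega),
      List.getElem_map]

theorem order_bounds (alpha : List Int) (x : Int) (hx : 1 ≤ x) (hx2 : x ≤ (alpha.length : Int)) :
    0 ≤ PySem.List.pyGetD (pvOrder alpha) (x - 1) 0
      ∧ PySem.List.pyGetD (pvOrder alpha) (x - 1) 0 < (alpha.length : Int) := by
  unfold pvOrder
  have hlen := length_pvOrder alpha
  unfold pvOrder at hlen
  have hmem : PySem.List.pyGetD
      (PySem.List.sorted (PySem.List.pyRange 0 (alpha.length : Int) 1) (keyOf alpha) true) (x - 1) 0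
      ∈ PySem.List.sorted (PySem.List.pyRange 0 (alpha.length : Int) 1) (keyOf alpha) true := by
    apply PySem.List.pyGetD_mem
    rw [hlen]
    exact ⟨by omega, by omega⟩
  rw [PySem.List.mem_sorted] at hmem
  have := PySem.List.mem_pyRange_one.mp hmem
  omega

-- the composed reflections, evaluated
theorem F_low (alpha : List Int) (x : Int) (hx : 1 ≤ x) (hx2 : x ≤ (alpha.length : Int)) :
    (sorting_permutation alpha).foldr (fun i y => sRefl i y) x
      = PySem.List.pyGetD (posOf alpha) (x - 1) 0 := by
  rw [pos_getD alpha x hx hx2]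
  exact word_order alpha x hx hx2

theorem F_high (alpha : List Int) (x : Int) (hx : (alpha.length : Int) < x) :
    (sorting_permutation alpha).foldr (fun i y => sRefl i y) x = x := by
  exact foldr_sRefl_fix _ (fun i hi => by have := word_bounds alpha i hi; omega) hx

theorem diagram_eq (alpha : List Int) : skew_symmetric_diagram alpha = cellsB alpha := by
  unfold skew_symmetric_diagram
  dsimp only
  rw [PySem.Set.ofList_eq_self_of_nodup _ (nodup_baseCells _),
      foldl_image _ _ (nodup_baseCells _)]
  simp only [List.foldl_reverse]
  unfold baseCells cellsB
  rw [List.map_flatMap]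
  have hmulen : (PySem.List.sorted alpha (fun x => x) true).length = alpha.length := by
    rw [PySem.List.length_sorted]
  rw [show (1 : Int) + ((PySem.List.sorted alpha (fun x => x) true).length : Int)
      = (alpha.length : Int) + 1 by rw [hmulen]; omega]
  apply List.flatMap_congr
  intro i hi
  have hi' := PySem.List.mem_pyRange_one.mp hi
  have hib : 1 ≤ i ∧ i ≤ (alpha.length : Int) := ⟨by omega, by omega⟩
  have hmu : PySem.List.pyGetD (PySem.List.sorted alpha (fun x => x) true) (i - 1) 0
      = keyOf alpha (PySem.List.pyGetD (pvOrder alpha) (i - 1) 0) := by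
    rw [mu_eq alpha]
    rw [PySem.List.pyGetD_eq_getElem _ _ (by omega)
          (by simp [length_pvOrder]; omega),
        PySem.List.pyGetD_eq_getElem _ _ (by omega) (by rw [length_pvOrder]; omega),
        List.getElem_map]
    rfl
  have hbound : 1 + PySem.List.pyGetD (PySem.List.sorted alpha (fun x => x) true) (i - 1) 0
      = PySem.List.pyGetD alpha (PySem.List.pyGetD (posOf alpha) (i - 1) 0 - 1) 0 + 1 := by
    rw [hmu, pos_getD alpha i hib.1 hib.2]
    unfold keyOf
    rw [show PySem.List.pyGetD (pvOrder alpha) (i - 1) 0 + 1 - 1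
        = PySem.List.pyGetD (pvOrder alpha) (i - 1) 0 by omega]
    omega
  rw [List.map_map, hbound]
  apply List.map_congr_left
  intro j hj
  have hj' := PySem.List.mem_pyRange_one.mp hj
  simp only [Function.comp_apply]
  refine Prod.ext ?_ ?_
  · exact F_low alpha i hib.1 hib.2
  · by_cases hjn : j ≤ (alpha.length : Int)
    · rw [if_pos hjn]
      exact F_low alpha j (by omega) hjn
    · rw [if_neg hjn]
      exact F_high alpha j (by omega)

-- ---- B's nested counting loop, fused over the cell list ----
def gStep (st : (PySem.Dict Int Int × PySem.Dict Int Int) × (Int × Int)) (ab : Int × Int) :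
    (PySem.Dict Int Int × PySem.Dict Int Int) × (Int × Int) :=
  if ab.1 < ab.2 then
    ((st.1.1.modify ab.1 0 (fun x => x + 1), st.1.2.modify ab.2 0 (fun x => x + 1)),
     (max st.2.1 ab.1, max st.2.2 ab.2))
  else st

def tailOut (st : (PySem.Dict Int Int × PySem.Dict Int Int) × (Int × Int)) : List Int × List Int :=
  ((PySem.List.pyRange 1 (st.2.1 + 1) 1).map (fun k => st.1.1.getD k 0),
   (PySem.List.pyRange 1 (st.2.2 + 1) 1).map (fun k => st.1.2.getD k 0))

def dictTail (cells : List (Int × Int)) : List Int × List Int :=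
  tailOut (cells.foldl gStep (((∅ : PySem.Dict Int Int), (∅ : PySem.Dict Int Int)), ((0 : Int), (0 : Int))))

theorem foldl_fused {σ : Type} (outer : List Int) (inner : Int → List Int)
    (cell : Int → Int → Int × Int) (g : σ → (Int × Int) → σ) (s0 : σ) :
    outer.foldl (fun s i => (inner i).foldl (fun s j => g s (cell i j)) s) s0
      = (outer.flatMap (fun i => (inner i).map (cell i))).foldl g s0 := by
  induction outer generalizing s0 with
  | nil => rfl
  | cons i t ih =>
      simp only [List.foldl_cons, List.flatMap_cons, List.foldl_append, ih, List.foldl_map]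

theorem alt_eq (alpha : List Int) :
    skew_symmetric_halves_alt alpha = dictTail (cellsB alpha) := by
  unfold skew_symmetric_halves_alt dictTail cellsB
  exact congrArg tailOut (foldl_fused
    (PySem.List.pyRange 1 ((alpha.length : Int) + 1) 1)
    (fun i => PySem.List.pyRange 1
      (PySem.List.pyGetD alpha (PySem.List.pyGetD (posOf alpha) (i - 1) 0 - 1) 0 + 1) 1)
    (fun i j => (PySem.List.pyGetD (posOf alpha) (i - 1) 0,
      if j ≤ (alpha.length : Int) then PySem.List.pyGetD (posOf alpha) (j - 1) 0 else j))
    gStep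
    (((∅ : PySem.Dict Int Int), (∅ : PySem.Dict Int Int)), ((0 : Int), (0 : Int))))

-- ---- counting arrays, running maxima, and the trim ----
def incArr (l : List Int) (a : Int) : List Int :=
  PySem.List.pySetD l (a - 1) (PySem.List.pyGetD l (a - 1) 0 + 1)

theorem getD_setD (l : List Int) (i k v : Int) (hi : 0 ≤ i) (hi2 : i < l.length)
    (hk : 0 ≤ k) (hk2 : k < l.length) :
    PySem.List.pyGetD (PySem.List.pySetD l i v) k 0 = if k = i then v else PySem.List.pyGetD l k 0 := by
  rw [PySem.List.pySetD_of_nonneg _ _ hi,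
      PySem.List.pyGetD_eq_getElem _ _ hk (by simp; omega)]
  split_ifs with h
  · subst h
    rw [List.getElem_set_self]
  · rw [List.getElem_set_ne (by omega), ← PySem.List.pyGetD_eq_getElem _ _ hk (by omega)]

theorem length_foldl_inc (as : List Int) (init : List Int) :
    (as.foldl incArr init).length = init.length := by
  induction as generalizing init with
  | nil => rfl
  | cons a t ih => simp only [List.foldl_cons]; rw [ih]; unfold incArr; simp [PySem.List.length_pySetD]

theorem getD_foldl_inc (as : List Int) : ∀ (init : List Int),
    (∀ a ∈ as, 1 ≤ a ∧ a ≤ (init.length : Int)) → ∀ (k : Int), 0 ≤ k →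
    k < (init.length : Int) →
    PySem.List.pyGetD (as.foldl incArr init) k 0
      = PySem.List.pyGetD init k 0 + ((as.count (k + 1) : Nat) : Int) := by
  induction as with
  | nil => intros; simp
  | cons a t ih =>
      intro init h k hk hk2
      have ha := h a List.mem_cons_self
      have hlen : ((incArr init a).length : Int) = (init.length : Int) := by
        unfold incArr; simp [PySem.List.length_pySetD]
      simp only [List.foldl_cons]
      rw [ih (incArr init a) (fun x hx => by
            have := h x (List.mem_cons_of_mem _ hx); omega) k hk (by omega)]
      have hstep : PySem.List.pyGetD (incArr init a) k 0
          = if k = a - 1 then PySem.List.pyGetD init (a - 1) 0 + 1 else PySem.List.pyGetD init k 0 := by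
        unfold incArr
        exact getD_setD init (a - 1) k _ (by omega) (by omega) hk (by omega)
      rw [hstep, List.count_cons]
      split_ifs with h1 <;> simp_all <;> omega

theorem foldl_max_le (t : List Int) (a N : Int) (ha : a ≤ N) (ht : ∀ y ∈ t, y ≤ N) :
    t.foldl max a ≤ N := by
  induction t generalizing a with
  | nil => exact ha
  | cons y ys ih =>
      simp only [List.foldl_cons]
      exact ih (max a y) (by have := ht y List.mem_cons_self; omega)
        (fun z hz => ht z (List.mem_cons_of_mem _ hz))

theorem foldl_max_mem (t : List Int) (a : Int) : t.foldl max a = a ∨ t.foldl max a ∈ t := by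
  induction t generalizing a with
  | nil => left; rfl
  | cons y ys ih =>
      simp only [List.foldl_cons]
      rcases ih (max a y) with h | h
      · by_cases hy : y ≤ a
        · left; rw [h, max_eq_left hy]
        · right; rw [h, max_eq_right (by omega : a ≤ y)]
          exact List.mem_cons_self
      · right; right; exact h

theorem repeat_replicate (N : Int) :
    PySem.List.pyRepeat [(0 : Int)] N = List.replicate N.toNat 0 := by
  unfold PySem.List.pyRepeat
  induction N.toNat with
  | zero => rfl
  | succ k ih => simp_all [List.replicate_succ]

theorem trim_take (m : Nat) (l : List Int) (hm : m ≤ l.length)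
    (hz : ∀ k, m ≤ k → k < l.length → l.getD k 0 = 0)
    (hnz : m = 0 ∨ l.getD (m - 1) 0 ≠ 0) : trimTrailingZeros l = l.take m := by
  induction l using List.reverseRecOn with
  | nil =>
      have : m = 0 := by simp at hm; omega
      subst this
      rw [trimTrailingZeros]
      simp [PySem.List.pyGet?]
  | append_singleton l x ih =>
      by_cases hx : x = 0
      · subst hx
        have hml : m ≤ l.length := by
          by_contra hc
          have hm' : m = l.length + 1 := by simp at hm; omega
          rcases hnz with h0 | hne
          · omega
          · apply hne
            rw [hm', show l.length + 1 - 1 = l.length by omega,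
                List.getD_append_right _ _ _ _ (Nat.le_refl _)]
            simp [List.getD]
        rw [show trimTrailingZeros (l ++ [0]) = trimTrailingZeros (l ++ [0]).dropLast from by
              rw [trimTrailingZeros]; rw [dif_pos (by simp [pysem])]]
        rw [List.dropLast_concat, List.take_append_of_le_length hml]
        apply ih hml
        · intro k h1 h2
          have := hz k h1 (by simp; omega)
          rwa [List.getD_append _ _ _ _ (by omega)] at this
        · rcases hnz with h0 | hne
          · exact Or.inl h0
          · by_cases hm0 : m = 0
            · exact Or.inl hm0
            · right
              intro hc
              apply hne
              rwa [List.getD_append _ _ _ _ (by omega)]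
      · have hm' : m = l.length + 1 := by
          by_contra hc
          have : m ≤ l.length := by simp at hm; omega
          have := hz l.length (by omega) (by simp)
          rw [List.getD_append_right _ _ _ _ (by omega), List.getD] at this
          simp at this
          exact hx this
        rw [show trimTrailingZeros (l ++ [x]) = l ++ [x] from by
              rw [trimTrailingZeros]; rw [dif_neg (by simp [pysem]; exact hx)]]
        rw [hm']
        simp

-- ---- one counted side: trimmed count array = counts up to the running max ----
theorem side_eq (xs : List Int) (N : Int) (hN : 0 ≤ N) (h1 : ∀ a ∈ xs, 1 ≤ a)
    (h2 : ∀ a ∈ xs, a ≤ N) :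
    trimTrailingZeros (xs.foldl incArr (PySem.List.pyRepeat [(0 : Int)] N))
      = (PySem.List.pyRange 1 (xs.foldl max 0 + 1) 1).map (fun k => ((xs.count k : Nat) : Int)) := by
  have h0r : 0 ≤ xs.foldl max 0 := (PySem.List.le_foldl_max xs 0).1
  have hrle : ∀ a ∈ xs, a ≤ xs.foldl max 0 := (PySem.List.le_foldl_max xs 0).2
  have hrN : xs.foldl max 0 ≤ N := foldl_max_le xs 0 N hN h2
  rw [repeat_replicate]
  have hinitlen : (List.replicate N.toNat (0 : Int)).length = N.toNat := by simp
  have hb : ∀ a ∈ xs, 1 ≤ a ∧ a ≤ ((List.replicate N.toNat (0 : Int)).length : Int) := by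
    intro a ha
    rw [hinitlen]
    exact ⟨h1 a ha, by have := h2 a ha; omega⟩
  have hlen : (xs.foldl incArr (List.replicate N.toNat (0 : Int))).length = N.toNat := by
    rw [length_foldl_inc, hinitlen]
  have hget : ∀ k : Nat, k < N.toNat →
      (xs.foldl incArr (List.replicate N.toNat (0 : Int))).getD k 0
        = ((xs.count ((k : Int) + 1) : Nat) : Int) := by
    intro k hk
    rw [← PySem.List.pyGetD_natCast,
        getD_foldl_inc xs _ hb (k : Int) (by omega) (by rw [hinitlen]; omega),
        PySem.List.pyGetD_natCast]
    simp
  rw [trim_take (xs.foldl max 0).toNat _ (by omega)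
        (by
          intro k hk1 hk2
          rw [hlen] at hk2
          rw [hget k hk2]
          have : (k : Int) + 1 ∉ xs := by
            intro hmem
            have := hrle _ hmem
            omega
          simp [List.count_eq_zero.mpr this])
        (by
          by_cases hr0 : xs.foldl max 0 = 0
          · left; omega
          · right
            have hk2 : (xs.foldl max 0).toNat - 1 < N.toNat := by omega
            rw [hget _ hk2]
            have hmem : xs.foldl max 0 ∈ xs := by
              rcases foldl_max_mem xs 0 with h | h
              · exact absurd h hr0
              · exact h
            have : ((((xs.foldl max 0).toNat - 1 : Nat) : Int) + 1) = xs.foldl max 0 := by omega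
            rw [this]
            have := List.count_pos_iff.mpr hmem
            simp
            omega)]
  apply List.ext_getElem
  · simp [hlen, PySem.List.length_pyRange_one]
    omega
  · intro k hk1 hk2
    rw [List.getElem_take, ← List.getD_eq_getElem _ 0 (by simp [hlen] at hk1 ⊢; omega),
        hget k (by simp [hlen] at hk1; omega), List.getElem_map,
        PySem.List.getElem_pyRange_one]
    congr 2
    omega

-- ---- both tails agree on any cell list with positive coordinates ----
theorem A_decomp (cells : List (Int × Int)) (i1 i2 : List Int) :
    cells.foldl (fun (rc : List Int × List Int) p =>
      if p.1 < p.2 then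
        (PySem.List.pySetD rc.1 (p.1 - 1) (PySem.List.pyGetD rc.1 (p.1 - 1) 0 + 1),
         PySem.List.pySetD rc.2 (p.2 - 1) (PySem.List.pyGetD rc.2 (p.2 - 1) 0 + 1))
      else rc) (i1, i2)
    = (((cells.filter (fun p => decide (p.1 < p.2))).map Prod.fst).foldl incArr i1,
       ((cells.filter (fun p => decide (p.1 < p.2))).map Prod.snd).foldl incArr i2) := by
  rw [List.foldl_map, List.foldl_map, List.foldl_filter, List.foldl_filter,
      ← PySem.List.foldl_prod_mk
        (fun l (p : Int × Int) => if decide (p.1 < p.2) = true then incArr l p.1 else l)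
        (fun l (p : Int × Int) => if decide (p.1 < p.2) = true then incArr l p.2 else l)
        cells i1 i2]
  apply List.foldl_ext
  intro acc p _
  by_cases h : p.1 < p.2 <;> simp [h, incArr]

theorem B_decomp (cells : List (Int × Int)) (d1 d2 : PySem.Dict Int Int) (r c : Int) :
    cells.foldl gStep ((d1, d2), (r, c))
    = ((((cells.filter (fun p => decide (p.1 < p.2))).map Prod.fst).foldl
          (fun d x => d.modify x 0 (fun x => x + 1)) d1,
        ((cells.filter (fun p => decide (p.1 < p.2))).map Prod.snd).foldl
          (fun d x => d.modify x 0 (fun x => x + 1)) d2),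
       (((cells.filter (fun p => decide (p.1 < p.2))).map Prod.fst).foldl max r,
        ((cells.filter (fun p => decide (p.1 < p.2))).map Prod.snd).foldl max c)) := by
  rw [List.foldl_map, List.foldl_map, List.foldl_map, List.foldl_map,
      List.foldl_filter, List.foldl_filter, List.foldl_filter, List.foldl_filter,
      ← PySem.List.foldl_prod_mk
        (fun d (p : Int × Int) => if decide (p.1 < p.2) = true then d.modify p.1 0 (fun x => x + 1) else d)
        (fun d (p : Int × Int) => if decide (p.1 < p.2) = true then d.modify p.2 0 (fun x => x + 1) else d)
        cells d1 d2,
      ← PySem.List.foldl_prod_mk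
        (fun m (p : Int × Int) => if decide (p.1 < p.2) = true then max m p.1 else m)
        (fun m (p : Int × Int) => if decide (p.1 < p.2) = true then max m p.2 else m)
        cells r c,
      ← PySem.List.foldl_prod_mk
        (fun dd (p : Int × Int) =>
          (if decide (p.1 < p.2) = true then dd.1.modify p.1 0 (fun x => x + 1) else dd.1,
           if decide (p.1 < p.2) = true then dd.2.modify p.2 0 (fun x => x + 1) else dd.2))
        (fun mm (p : Int × Int) =>
          (if decide (p.1 < p.2) = true then max mm.1 p.1 else mm.1,
           if decide (p.1 < p.2) = true then max mm.2 p.2 else mm.2))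
        cells (d1, d2) (r, c)]
  apply List.foldl_ext
  intro acc p _
  by_cases h : p.1 < p.2 <;> simp [h, gStep]

theorem tail_eq (cells : List (Int × Int)) (hpos : ∀ p ∈ cells, 1 ≤ p.1 ∧ 1 ≤ p.2) :
    halvesOf cells = dictTail cells := by
  unfold halvesOf dictTail tailOut
  obtain ⟨m, hm⟩ : ∃ m, PySem.List.max? ((0 : Int) :: cells.map (fun p => max p.1 p.2))
      (fun y => y) = some m := ⟨_, PySem.List.max?_id_cons _ _⟩
  have hmax := PySem.List.max?_isMax hm
  have h0m : 0 ≤ m := by simpa using hmax 0 (by simp)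
  have hcm : ∀ p ∈ cells, max p.1 p.2 ≤ m := by
    intro p hp
    simpa using hmax (max p.1 p.2) (by simp; exact Or.inr ⟨p.1, p.2, hp, rfl⟩)
  rw [hm]
  simp only [Option.getD_some]
  rw [A_decomp, B_decomp]
  have hside : ∀ (sel : Int × Int → Int),
      (∀ p ∈ cells, 1 ≤ sel p) → (∀ p ∈ cells, sel p ≤ max p.1 p.2) →
      trimTrailingZeros
        (((cells.filter (fun p => decide (p.1 < p.2))).map sel).foldl incArr
          (PySem.List.pyRepeat [(0 : Int)] m))
      = (PySem.List.pyRange 1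
            (((cells.filter (fun p => decide (p.1 < p.2))).map sel).foldl max 0 + 1) 1).map
          (fun k => (((cells.filter (fun p => decide (p.1 < p.2))).map sel).foldl
            (fun d x => d.modify x 0 (fun x => x + 1)) (∅ : PySem.Dict Int Int)).getD k 0) := by
    intro sel hs1 hs2
    have hmem : ∀ a ∈ (cells.filter (fun p => decide (p.1 < p.2))).map sel,
        a ∈ cells.map sel := by
      intro a ha
      simp only [List.mem_map] at ha ⊢
      rcases ha with ⟨p, hp, rfl⟩
      exact ⟨p, List.mem_of_mem_filter hp, rfl⟩
    rw [side_eq _ m h0m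
          (by
            intro a ha
            rcases List.mem_map.mp (hmem a ha) with ⟨p, hp, rfl⟩
            exact hs1 p hp)
          (by
            intro a ha
            rcases List.mem_map.mp (hmem a ha) with ⟨p, hp, rfl⟩
            exact le_trans (hs2 p hp) (hcm p hp))]
    apply List.map_congr_left
    intro k _
    rw [PySem.Dict.getD_foldl_modify_add_one]
    show ((List.count k _ : Nat) : Int) = (0 : Int) + _
    rw [zero_add]
  exact Prod.ext
    (hside Prod.fst (fun p hp => (hpos p hp).1) (fun p _ => le_max_left _ _))
    (hside Prod.snd (fun p hp => (hpos p hp).2) (fun p _ => le_max_right _ _))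


-- ===== VERDICT (by name: the statement is the Claim_ definition above) =====
theorem skew_symmetric_halves_spec : Claim_equal_skew_symmetric_halves := by
  intro alpha _
  unfold Spec_skew_symmetric_halves
  rw [alt_eq]
  unfold skew_symmetric_halves
  rw [diagram_eq]
  apply tail_eq
  intro p hp
  unfold cellsB at hp
  simp only [List.mem_flatMap, List.mem_map] at hp
  obtain ⟨i, hi, j, hj, rfl⟩ := hp
  have hi' := PySem.List.mem_pyRange_one.mp hi
  have hj' := PySem.List.mem_pyRange_one.mp hj
  have hpa : 1 ≤ PySem.List.pyGetD (posOf alpha) (i - 1) 0 := by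
    rw [pos_getD alpha i (by omega) (by omega)]
    have := order_bounds alpha i (by omega) (by omega)
    omega
  refine ⟨hpa, ?_⟩
  dsimp only
  by_cases hjn : j ≤ (alpha.length : Int)
  · rw [if_pos hjn, pos_getD alpha j (by omega) hjn]
    have := order_bounds alpha j (by omega) hjn
    omega
  · rw [if_neg hjn]
    omega
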